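-- pv_equiv track=rewrite | github.com/rsantana-isg/nasjax | nasjax/descriptors/tcnn.py | calculate_tcnn_output_shape
-- ===== SOURCE A (Python) =====
-- from typing import Any, Dict, NamedTuple, Optional, Tuple
--
-- def calculate_tcnn_output_shape(
--     input_shape: Tuple[int, int, int],
--     filters: Tuple[Tuple[int, int, int], ...],
--     strides: Tuple[Tuple[int, int, int], ...],
-- ) -> Tuple[int, int, int]:
--     """Calculate the output shape after applying transposed convolutional layers.
--
--     For transposed convolution, the output size is:
--         output = input * stride + max(filter - stride, 0)
--
--     Args:
--         input_shape: Input shape (height, width, channels)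
--         filters: Tuple of filter sizes for each layer (h, w, c)
--         strides: Tuple of stride sizes for each layer (h, w, c)
--
--     Returns:
--         Output shape (height, width, channels) after all layers
--     """
--     if len(filters) == 0:
--         return input_shape
--
--     h, w, c = input_shape
--     fh, fw, fc = filters[0]
--     sh, sw, _ = strides[0]
--
--     # Calculate output dimensions for transposed convolution
--     out_h = h * sh + max(fh - sh, 0)
--     out_w = w * sw + max(fw - sw, 0)
--     out_c = fc
--
--     # Recursively calculate for remaining layers
--     if len(filters) > 1:
--         return calculate_tcnn_output_shape((out_h, out_w, out_c), filters[1:], strides[1:])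
--     return (out_h, out_w, out_c)
-- ===== SOURCE B (Python) =====
-- def calculate_tcnn_output_shape(input_shape, filters, strides):
--     h, w, c = input_shape
--     for i in range(len(filters)):
--         fh, fw, fc = filters[i]
--         sh, sw, _ = strides[i]
--         h = h * sh + max(fh - sh, 0)
--         w = w * sw + max(fw - sw, 0)
--         c = fc
--     return (h, w, c)
-- ===== Notes on version B (the rewrite author's own statement) =====
-- stated objective: simpler
-- what changed: Replaces the tail recursion that rebuilds filters[1:]/strides[1:] tuples at every layer with a single indexed loop that updates (h, w, c) in place.
import Mathlib
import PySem

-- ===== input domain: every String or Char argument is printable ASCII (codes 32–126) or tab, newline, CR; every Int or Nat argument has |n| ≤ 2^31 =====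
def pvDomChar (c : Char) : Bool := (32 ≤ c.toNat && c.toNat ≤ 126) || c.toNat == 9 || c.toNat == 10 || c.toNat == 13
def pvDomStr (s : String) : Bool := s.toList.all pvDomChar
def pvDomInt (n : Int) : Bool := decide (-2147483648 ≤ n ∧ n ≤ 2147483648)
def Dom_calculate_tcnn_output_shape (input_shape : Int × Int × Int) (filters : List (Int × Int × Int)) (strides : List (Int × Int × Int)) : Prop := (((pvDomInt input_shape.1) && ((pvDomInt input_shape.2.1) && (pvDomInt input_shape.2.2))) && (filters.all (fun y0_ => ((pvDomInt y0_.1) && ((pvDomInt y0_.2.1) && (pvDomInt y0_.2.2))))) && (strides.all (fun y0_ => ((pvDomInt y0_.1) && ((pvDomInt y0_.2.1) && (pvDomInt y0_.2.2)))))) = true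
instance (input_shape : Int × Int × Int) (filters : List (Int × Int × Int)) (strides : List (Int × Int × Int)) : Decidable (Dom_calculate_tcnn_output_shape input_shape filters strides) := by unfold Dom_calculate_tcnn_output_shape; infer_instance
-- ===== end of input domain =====

-- B replaces A's tail recursion (which rebuilds filters[1:]/strides[1:] each layer) with a
-- single indexed loop updating (h, w, c); simpler, return value only (no mutation in either).

-- ===== PORT A =====
-- A's recursion: base case on empty filters, otherwise one layer then recurse on the tails.
def calculate_tcnn_output_shape (input_shape : Int × Int × Int) (filters : List (Int × Int × Int)) (strides : List (Int × Int × Int)) : Int × Int × Int :=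
  match filters with
  | [] => input_shape
  | (fh, fw, fc) :: fs =>
    match strides with
    | [] => input_shape   -- Python raises IndexError on strides[0] here; excluded by Pre_
    | (sh, sw, _) :: ss =>
      let h := input_shape.1
      let w := input_shape.2.1
      let out_h := h * sh + max (fh - sh) 0
      let out_w := w * sw + max (fw - sw) 0
      let out_c := fc
      if fs.length > 0 then
        calculate_tcnn_output_shape (out_h, out_w, out_c) fs ss
      else
        (out_h, out_w, out_c)

-- ===== PORT B =====
-- B's loop: for i in range(len(filters)) index filters[i]/strides[i] and update (h, w, c).
-- (getD's default is never read inside Pre_, where i < strides.length.)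
def calculate_tcnn_output_shape_alt (input_shape : Int × Int × Int) (filters : List (Int × Int × Int)) (strides : List (Int × Int × Int)) : Int × Int × Int :=
  (List.range filters.length).foldl
    (fun hwc i =>
      let f := filters.getD i (0, 0, 0)
      let s := strides.getD i (0, 0, 0)
      (hwc.1 * s.1 + max (f.1 - s.1) 0,
       hwc.2.1 * s.2.1 + max (f.2.1 - s.2.1) 0,
       f.2.2))
    input_shape

-- ===== PRECONDITION & SPEC =====
-- Pre_ excludes exactly the inputs where A raises IndexError (strides shorter than filters).
def Pre_calculate_tcnn_output_shape (input_shape : Int × Int × Int) (filters : List (Int × Int × Int)) (strides : List (Int × Int × Int)) : Prop := filters.length ≤ strides.length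
instance (input_shape : Int × Int × Int) (filters : List (Int × Int × Int)) (strides : List (Int × Int × Int)) : Decidable (Pre_calculate_tcnn_output_shape input_shape filters strides) := by unfold Pre_calculate_tcnn_output_shape; infer_instance

def pvWitness_calculate_tcnn_output_shape : (Int × Int × Int) × (List (Int × Int × Int)) × (List (Int × Int × Int)) := ((4, 4, 3), [(3, 3, 16), (2, 2, 8)], [(2, 2, 1), (1, 1, 1)])

def Spec_calculate_tcnn_output_shape (input_shape : Int × Int × Int) (filters : List (Int × Int × Int)) (strides : List (Int × Int × Int)) (out : Int × Int × Int) : Prop := out = calculate_tcnn_output_shape_alt input_shape filters strides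
instance (input_shape : Int × Int × Int) (filters : List (Int × Int × Int)) (strides : List (Int × Int × Int)) (out : Int × Int × Int) : Decidable (Spec_calculate_tcnn_output_shape input_shape filters strides out) := by unfold Spec_calculate_tcnn_output_shape; infer_instance

-- ===== CLAIM (what is proved, stated in full; the proofs are below) =====
def Claim_equal_calculate_tcnn_output_shape : Prop := ∀ (input_shape : Int × Int × Int) (filters : List (Int × Int × Int)) (strides : List (Int × Int × Int)), Dom_calculate_tcnn_output_shape input_shape filters strides → Pre_calculate_tcnn_output_shape input_shape filters strides → Spec_calculate_tcnn_output_shape input_shape filters strides (calculate_tcnn_output_shape input_shape filters strides)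

-- ===== LEMMAS AND PROOFS =====

-- Peeling one layer off B's indexed loop.
lemma alt_cons (ish : Int × Int × Int) (f s : Int × Int × Int) (fs ss : List (Int × Int × Int)) :
    calculate_tcnn_output_shape_alt ish (f :: fs) (s :: ss) =
    calculate_tcnn_output_shape_alt
      (ish.1 * s.1 + max (f.1 - s.1) 0, ish.2.1 * s.2.1 + max (f.2.1 - s.2.1) 0, f.2.2) fs ss := by
  simp [calculate_tcnn_output_shape_alt, List.range_succ_eq_map, List.foldl_map]

lemma agree (filters : List (Int × Int × Int)) :
    ∀ (ish : Int × Int × Int) (strides : List (Int × Int × Int)),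
      filters.length ≤ strides.length →
      calculate_tcnn_output_shape ish filters strides =
      calculate_tcnn_output_shape_alt ish filters strides := by
  induction filters with
  | nil => intro ish strides _; simp [calculate_tcnn_output_shape, calculate_tcnn_output_shape_alt]
  | cons f fs ih =>
    intro ish strides hlen
    cases strides with
    | nil => simp at hlen
    | cons s ss =>
      obtain ⟨fh, fw, fc⟩ := f
      obtain ⟨sh, sw, sc⟩ := s
      rw [alt_cons]
      simp only [List.length_cons, Nat.succ_le_succ_iff] at hlen
      cases fs with
      | nil => simp [calculate_tcnn_output_shape, calculate_tcnn_output_shape_alt]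
      | cons f' fs' =>
        rw [show calculate_tcnn_output_shape ish ((fh, fw, fc) :: f' :: fs') ((sh, sw, sc) :: ss)
            = calculate_tcnn_output_shape
                (ish.1 * sh + max (fh - sh) 0, ish.2.1 * sw + max (fw - sw) 0, fc) (f' :: fs') ss
            from by simp [calculate_tcnn_output_shape]]
        exact ih _ ss hlen

-- ===== VERDICT (by name: the statement is the Claim_ definition above) =====
theorem calculate_tcnn_output_shape_spec : Claim_equal_calculate_tcnn_output_shape := by
  intro ish filters strides _ hpre
  exact agree filters ish strides hpre
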